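-- pv_equiv track=rewrite | github.com/dudamarlena/pyc_source | pycfiles/gumbo-0.10.0.macosx-10.10-x86_64.tar/html5lib_adapter_test.py | convertExpected
-- ===== SOURCE A (Python) =====
-- def convertExpected(data, stripChars):
--     """convert the output of str(document) to the format used in the testcases"""
--     data = data.split('\n')
--     rv = []
--     for line in data:
--         if line.startswith('|'):
--             rv.append(line[stripChars:])
--         else:
--             rv.append(line)
--
--     return ('\n').join(rv)
-- ===== SOURCE B (Python) =====
-- def convertExpected(data, stripChars):
--     """convert the output of str(document) to the format used in the testcases"""
--     out = []
--     skip = 0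
--     start = True
--     for ch in data:
--         if ch == '\n':
--             out.append(ch)
--             skip = 0
--             start = True
--         else:
--             if start:
--                 start = False
--                 if ch == '|':
--                     skip = stripChars
--             if skip > 0:
--                 skip -= 1
--             else:
--                 out.append(ch)
--     return ''.join(out)
-- ===== Notes on version B (the rewrite author's own statement) =====
-- stated objective: alternative
-- what changed: Replaces A's split-into-lines / per-line slice / join pipeline with a single character-level state-machine pass over the string (line-start flag plus a skip counter), building the output directly without ever materialising a line list.
-- intended difference: On negative stripChars with some '|' line longer than -stripChars, A's line[stripChars:] wraps around and keeps only that line's trailing -stripChars characters, while B strips nothing; B's value is intended since stripChars is a prefix width and a negative width should strip nothing. — e.g. on convertExpected("|ab", -1): A returns "b", B returns "|ab"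
import Mathlib
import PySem

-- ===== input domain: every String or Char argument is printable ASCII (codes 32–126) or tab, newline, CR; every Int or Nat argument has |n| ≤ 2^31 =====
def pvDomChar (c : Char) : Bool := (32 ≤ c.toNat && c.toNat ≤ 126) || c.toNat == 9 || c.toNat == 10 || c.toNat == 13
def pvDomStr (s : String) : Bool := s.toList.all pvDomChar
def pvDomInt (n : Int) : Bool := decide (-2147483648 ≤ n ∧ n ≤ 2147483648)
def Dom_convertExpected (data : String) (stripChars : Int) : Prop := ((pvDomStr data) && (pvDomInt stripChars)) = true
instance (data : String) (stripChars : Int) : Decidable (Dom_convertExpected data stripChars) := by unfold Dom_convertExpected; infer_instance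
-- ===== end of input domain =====

-- B replaces A's split / per-line slice / join with a single character-level state-machine pass
-- (no line list is built); objective: alternative — same O(n) cost, different traversal.

-- ===== PORT A =====
-- literal port of A: split on '\n', per line append line[stripChars:] or line, join with '\n'
def convertExpected (data : String) (stripChars : Int) : String :=
  String.ofList (PySem.Chars.join ['\n']                    -- '\n'.join(rv)
    ((PySem.Chars.splitOn data.toList ['\n']).foldl          -- for line in data.split('\n')
      (fun rv line =>
        if PySem.Chars.startswith line ['|'] then rv ++ [PySem.Chars.slice line (some stripChars) none]
        else rv ++ [line])
      ([] : List (List Char))))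

-- ===== PORT B =====
-- one step of B's loop body on the state (out, skip, start), exactly the Python branches
def pvStepB (stripChars : Int) (st : List Char × Int × Bool) (ch : Char) : List Char × Int × Bool :=
  match st with
  | (out, skip, start) =>
    if ch = '\n' then (out ++ ['\n'], (0 : Int), true)
    else
      let p : Bool × Int := if start then (false, if ch = '|' then stripChars else skip) else (start, skip)
      if p.2 > 0 then (out, p.2 - 1, p.1) else (out ++ [ch], p.2, p.1)

def convertExpected_alt (data : String) (stripChars : Int) : String :=
  String.ofList (data.toList.foldl (pvStepB stripChars) (([] : List Char), (0 : Int), true)).1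
  -- ''.join(out) over single characters is exactly the string of those characters

-- ===== PRECONDITION & SPEC =====
-- the lines of a character list, split at '\n' (used only to state D_)
def pvLines : List Char → List (List Char)
  | [] => [[]]
  | c :: r =>
    if c = '\n' then [] :: pvLines r
    else match pvLines r with
         | h :: t => (c :: h) :: t
         | [] => [[c]]

-- On negative stripChars, A's slice line[stripChars:] wraps around and keeps only the trailing
-- -stripChars characters of every '|' line longer than -stripChars; B strips nothing there,
-- which is the intended reading of stripChars as a (non-effective) prefix width.
def D_convertExpected (data : String) (stripChars : Int) : Prop :=
  stripChars < 0 ∧ ∃ l ∈ pvLines data.toList,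
    PySem.Chars.startswith l ['|'] = true ∧ -stripChars < (l.length : Int)
instance (data : String) (stripChars : Int) : Decidable (D_convertExpected data stripChars) := by
  unfold D_convertExpected; infer_instance

def Spec_convertExpected (data : String) (stripChars : Int) (out : String) : Prop :=
  ¬ D_convertExpected data stripChars → out = convertExpected_alt data stripChars
instance (data : String) (stripChars : Int) (out : String) : Decidable (Spec_convertExpected data stripChars out) := by
  unfold Spec_convertExpected; infer_instance

def pvDiffWitness_convertExpected : String × Int := ("|ab", -1)
def pvDiffWitnessOut_convertExpected : String × String := ("b", "|ab")

-- ===== CLAIM (what is proved, stated in full; the proofs are below) =====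
def Claim_unchanged_convertExpected : Prop := ∀ (data : String) (stripChars : Int), Dom_convertExpected data stripChars → Spec_convertExpected data stripChars (convertExpected data stripChars)
def Claim_changed_convertExpected : Prop := Dom_convertExpected (pvDiffWitness_convertExpected.1) (pvDiffWitness_convertExpected.2) ∧ D_convertExpected (pvDiffWitness_convertExpected.1) (pvDiffWitness_convertExpected.2) ∧ convertExpected (pvDiffWitness_convertExpected.1) (pvDiffWitness_convertExpected.2) = pvDiffWitnessOut_convertExpected.1 ∧ convertExpected_alt (pvDiffWitness_convertExpected.1) (pvDiffWitness_convertExpected.2) = pvDiffWitnessOut_convertExpected.2 ∧ pvDiffWitnessOut_convertExpected.1 ≠ pvDiffWitnessOut_convertExpected.2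
def Claim_exact_convertExpected : Prop := ∀ (data : String) (stripChars : Int), Dom_convertExpected data stripChars → D_convertExpected data stripChars → convertExpected data stripChars ≠ convertExpected_alt data stripChars

-- ===== LEMMAS AND PROOFS =====

-- pvLines never returns the empty list
theorem pvLines_ne_nil (cs : List Char) : pvLines cs ≠ [] := by
  induction cs with
  | nil => simp [pvLines]
  | cons c r ih =>
    simp only [pvLines]
    split
    · simp
    · cases h : pvLines r with
      | nil => simp
      | cons a t => simp

-- prepend to the first line
def pvConsHead (pre : List Char) : List (List Char) → List (List Char)
  | [] => [pre]
  | h :: t => (pre ++ h) :: t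

theorem pvConsHead_nil_of_ne_nil {ll : List (List Char)} (h : ll ≠ []) : pvConsHead [] ll = ll := by
  cases ll with
  | nil => exact absurd rfl h
  | cons a t => simp [pvConsHead]

theorem go_cons (n : Nat) (c : Char) (rest cur : List Char) (acc : List (List Char)) :
    PySem.Chars.splitOn.go ['\n'] (n + 1) (c :: rest) cur acc
      = if ['\n'].isPrefixOf (c :: rest) = true then
          PySem.Chars.splitOn.go ['\n'] n rest [] (cur.reverse :: acc)
        else PySem.Chars.splitOn.go ['\n'] n rest (c :: cur) acc := by
  rw [PySem.Chars.splitOn.go.eq_def]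
  rfl

-- splitOn.go on separator "\n" computes pvLines
theorem go_eq_pvLines : ∀ (fuel : Nat) (l cur : List Char) (acc : List (List Char)),
    l.length ≤ fuel →
    PySem.Chars.splitOn.go ['\n'] fuel l cur acc = acc.reverse ++ pvConsHead cur.reverse (pvLines l) := by
  intro fuel
  induction fuel with
  | zero =>
    intro l cur acc hl
    have : l = [] := List.length_eq_zero_iff.mp (Nat.le_zero.mp hl)
    subst this
    rw [PySem.Chars.splitOn.go.eq_def]
    simp [pvLines, pvConsHead]
  | succ n ih =>
    intro l cur acc hl
    cases l with
    | nil =>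
      rw [PySem.Chars.splitOn.go.eq_def]
      simp [pvLines, pvConsHead]
    | cons c rest =>
      rw [go_cons]
      by_cases hc : c = '\n'
      · subst hc
        have hpre : ['\n'].isPrefixOf ('\n' :: rest) = true := by
          simp [List.isPrefixOf]
        rw [if_pos hpre]
        have hrest : rest.length ≤ n := by
          simp only [List.length_cons] at hl; omega
        rw [ih rest [] (cur.reverse :: acc) hrest]
        have hne := pvLines_ne_nil rest
        simp only [List.reverse_nil]
        rw [pvConsHead_nil_of_ne_nil hne]
        simp [pvLines, pvConsHead]
      · have hpre : ['\n'].isPrefixOf (c :: rest) = false := by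
          simp [List.isPrefixOf]
          exact fun h => hc h.symm
        rw [if_neg (by simp [hpre])]
        have hrest : rest.length ≤ n := by
          simp only [List.length_cons] at hl; omega
        rw [ih rest (c :: cur) acc hrest]
        obtain ⟨h, t, hht⟩ : ∃ h t, pvLines rest = h :: t := by
          cases hh : pvLines rest with
          | nil => exact absurd hh (pvLines_ne_nil rest)
          | cons a b => exact ⟨a, b, rfl⟩
        simp [pvLines, hc, hht, pvConsHead]

theorem splitOn_eq_pvLines (cs : List Char) :
    PySem.Chars.splitOn cs ['\n'] = pvLines cs := by
  show PySem.Chars.splitOn.go ['\n'] (cs.length + 1) cs [] [] = _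
  rw [go_eq_pvLines (cs.length + 1) cs [] [] (by omega)]
  simp [pvConsHead_nil_of_ne_nil (pvLines_ne_nil cs)]

theorem pvLines_no_newline {l : List Char} (h : '\n' ∉ l) : pvLines l = [l] := by
  induction l with
  | nil => rfl
  | cons c r ih =>
    have hc : c ≠ '\n' := fun hc => h (by simp [hc])
    have hr : '\n' ∉ r := fun hr => h (by simp [hr])
    simp [pvLines, hc, ih hr]

theorem pvLines_append_newline {l : List Char} (r : List Char) (h : '\n' ∉ l) :
    pvLines (l ++ '\n' :: r) = l :: pvLines r := by
  induction l with
  | nil => simp [pvLines]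
  | cons c s ih =>
    have hc : c ≠ '\n' := fun hc => h (by simp [hc])
    have hs : '\n' ∉ s := fun hs => h (by simp [hs])
    simp [pvLines, hc, ih hs]

-- A's loop is a map
def pvFA (k : Int) (line : List Char) : List Char :=
  if PySem.Chars.startswith line ['|'] then PySem.Chars.slice line (some k) none else line

theorem foldl_push (k : Int) : ∀ (lines : List (List Char)) (init : List (List Char)),
    lines.foldl (fun rv line =>
      if PySem.Chars.startswith line ['|'] then rv ++ [PySem.Chars.slice line (some k) none]
      else rv ++ [line]) init = init ++ lines.map (pvFA k) := by
  intro lines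
  induction lines with
  | nil => simp
  | cons a t ih =>
    intro init
    simp only [List.foldl_cons, List.map_cons]
    by_cases h : PySem.Chars.startswith a ['|'] = true
    · rw [if_pos h, ih]; simp [pvFA, h]
    · rw [if_neg h, ih]; simp [pvFA, h]

-- the three shapes of one B step
theorem pvStepB_newline (k : Int) (out : List Char) (s : Int) (b : Bool) :
    pvStepB k (out, s, b) '\n' = (out ++ ['\n'], 0, true) := by
  simp [pvStepB]

theorem pvStepB_mid (k : Int) (out : List Char) (s : Int) {c : Char} (hc : c ≠ '\n') :
    pvStepB k (out, s, false) c
      = if s > 0 then (out, s - 1, false) else (out ++ [c], s, false) := by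
  simp [pvStepB, hc]

theorem pvStepB_start (k : Int) (out : List Char) (s : Int) {c : Char} (hc : c ≠ '\n') :
    pvStepB k (out, s, true) c
      = (if (if c = '|' then k else s) > 0 then (out, (if c = '|' then k else s) - 1, false)
         else (out ++ [c], (if c = '|' then k else s), false)) := by
  simp [pvStepB, hc]

-- B's per-line residue: drop characters while the skip counter is positive
def pvEat (s : Int) : List Char → List Char
  | [] => []
  | c :: r => if s > 0 then pvEat (s - 1) r else c :: pvEat s r

theorem pvEat_nonpos {s : Int} (hs : s ≤ 0) : ∀ l, pvEat s l = l := by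
  intro l
  induction l with
  | nil => rfl
  | cons c r ih => simp [pvEat, ih, show ¬ s > 0 by omega]

theorem pvEat_nonneg (s : Int) (hs : 0 ≤ s) : ∀ l, pvEat s l = l.drop s.toNat := by
  induction s, hs using Int.le_induction with
  | base => intro l; simpa using pvEat_nonpos le_rfl l
  | succ n hn ih =>
    intro l
    cases l with
    | nil => simp [pvEat]
    | cons c r =>
      have hpos : (n + 1 : Int) > 0 := by omega
      have htn : (n + 1 : Int).toNat = n.toNat + 1 := by omega
      simp only [pvEat, if_pos hpos, add_sub_cancel_right, ih r, htn, List.drop_succ_cons]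

def pvFB (k : Int) (line : List Char) : List Char :=
  if PySem.Chars.startswith line ['|'] then pvEat k line else line

theorem run_noNL (k : Int) : ∀ (l : List Char), '\n' ∉ l → ∀ (out : List Char) (s : Int),
    ∃ s', List.foldl (pvStepB k) (out, s, false) l = (out ++ pvEat s l, s', false) := by
  intro l
  induction l with
  | nil => intro _ out s; exact ⟨s, by simp [pvEat]⟩
  | cons c r ih =>
    intro h out s
    have hc : c ≠ '\n' := fun hc => h (by simp [hc])
    have hr : '\n' ∉ r := fun hr => h (by simp [hr])
    rw [List.foldl_cons, pvStepB_mid k out s hc]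
    by_cases hs : s > 0
    · rw [if_pos hs]
      obtain ⟨s', hrun⟩ := ih hr out (s - 1)
      exact ⟨s', by rw [hrun]; simp [pvEat, hs]⟩
    · rw [if_neg hs]
      obtain ⟨s', hrun⟩ := ih hr (out ++ [c]) s
      exact ⟨s', by rw [hrun]; simp [pvEat, hs]⟩

theorem run_line (k : Int) (l : List Char) (h : '\n' ∉ l) (out : List Char) :
    ∃ s' b', List.foldl (pvStepB k) (out, 0, true) l = (out ++ pvFB k l, s', b') := by
  cases l with
  | nil => exact ⟨0, true, by simp [pvFB, PySem.Chars.startswith, List.isPrefixOf]⟩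
  | cons c r =>
    have hc : c ≠ '\n' := fun hc => h (by simp [hc])
    have hr : '\n' ∉ r := fun hr => h (by simp [hr])
    rw [List.foldl_cons, pvStepB_start k out 0 hc]
    by_cases hp : c = '|'
    · subst hp
      have hsw : PySem.Chars.startswith ('|' :: r) ['|'] = true := by
        simp [PySem.Chars.startswith, List.isPrefixOf]
      rw [if_pos rfl]
      by_cases hk : k > 0
      · rw [if_pos hk]
        obtain ⟨s', hrun⟩ := run_noNL k r hr out (k - 1)
        exact ⟨s', false, by rw [hrun]; simp [pvFB, hsw, pvEat, hk]⟩
      · rw [if_neg hk]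
        obtain ⟨s', hrun⟩ := run_noNL k r hr (out ++ ['|']) k
        exact ⟨s', false, by rw [hrun]; simp [pvFB, hsw, pvEat, hk]⟩
    · have hsw : PySem.Chars.startswith (c :: r) ['|'] = false := by
        simp [PySem.Chars.startswith, List.isPrefixOf]
        exact fun hcc => absurd hcc.symm hp
      rw [if_neg hp, if_neg (by omega : ¬ ((0 : Int) > 0))]
      obtain ⟨s', hrun⟩ := run_noNL k r hr (out ++ [c]) 0
      refine ⟨s', false, ?_⟩
      rw [hrun, pvEat_nonpos le_rfl]
      simp [pvFB, hsw]

theorem join_cons_ne_nil (a : List Char) {ll : List (List Char)} (h : ll ≠ []) :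
    PySem.Chars.join ['\n'] (a :: ll) = a ++ '\n' :: PySem.Chars.join ['\n'] ll := by
  cases ll with
  | nil => exact absurd rfl h
  | cons b t => rw [PySem.Chars.join_cons_cons]; simp

theorem run_all (k : Int) : ∀ (n : Nat) (cs : List Char), cs.length ≤ n → ∀ (out : List Char),
    (List.foldl (pvStepB k) (out, 0, true) cs).1
      = out ++ PySem.Chars.join ['\n'] ((pvLines cs).map (pvFB k)) := by
  intro n
  induction n with
  | zero =>
    intro cs hcs out
    have : cs = [] := List.length_eq_zero_iff.mp (Nat.le_zero.mp hcs)
    subst this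
    simp [pvLines, PySem.Chars.join_singleton, pvFB, PySem.Chars.startswith, List.isPrefixOf]
  | succ n ih =>
    intro cs hcs out
    by_cases hnl : '\n' ∈ cs
    · -- cs = l ++ '\n' :: r, '\n' ∉ l
      obtain ⟨r, hr⟩ : ∃ r, cs.dropWhile (· ≠ '\n') = '\n' :: r := by
        cases hd : cs.dropWhile (· ≠ '\n') with
        | nil =>
          exfalso
          have htd := List.takeWhile_append_dropWhile (p := (· ≠ '\n')) (l := cs)
          rw [hd, List.append_nil] at htd
          rw [← htd] at hnl
          have := List.mem_takeWhile_imp hnl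
          simp at this
        | cons a r =>
          have ha := List.head?_dropWhile_not (fun x => decide (x ≠ '\n')) cs
          rw [hd] at ha
          simp at ha
          subst ha
          exact ⟨r, rfl⟩
      have hdecomp : cs = cs.takeWhile (· ≠ '\n') ++ '\n' :: r := by
        conv_lhs => rw [← List.takeWhile_append_dropWhile (p := (· ≠ '\n')) (l := cs)]
        rw [hr]
      set l := cs.takeWhile (· ≠ '\n') with hl
      have hlnn : '\n' ∉ l := by
        intro hmem
        have := List.mem_takeWhile_imp (hl ▸ hmem)
        simp at this
      have hrlen : r.length ≤ n := by
        have := congrArg List.length hdecomp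
        simp only [List.length_append, List.length_cons] at this
        omega
      rw [hdecomp, List.foldl_append]
      obtain ⟨s', b', hrun⟩ := run_line k l hlnn out
      rw [hrun, List.foldl_cons, pvStepB_newline]
      rw [ih r hrlen (out ++ pvFB k l ++ ['\n'])]
      rw [pvLines_append_newline r hlnn, List.map_cons]
      rw [join_cons_ne_nil _ (by simp [pvLines_ne_nil r])]
      simp
    · obtain ⟨s', b', hrun⟩ := run_line k cs hnl out
      rw [hrun, pvLines_no_newline hnl]
      simp [PySem.Chars.join_singleton]

-- per-line agreement outside D_
theorem line_agree (k : Int) (l : List Char)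
    (h : ¬ (k < 0 ∧ PySem.Chars.startswith l ['|'] = true ∧ -k < (l.length : Int))) :
    pvFA k l = pvFB k l := by
  by_cases hsw : PySem.Chars.startswith l ['|'] = true
  · simp only [pvFA, pvFB, if_pos hsw, PySem.Chars.slice_eq_listSlice]
    by_cases hk : 0 ≤ k
    · rw [PySem.List.slice_from l hk, pvEat_nonneg k hk]
    · have hk' : k < 0 := by omega
      have hlen : (l.length : Int) ≤ -k := by
        by_contra hc
        exact h ⟨hk', hsw, by omega⟩
      rw [pvEat_nonpos (by omega), PySem.List.slice_some_none]
      have hcl : PySem.List.clampIdx l.length k = 0 := by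
        simp only [PySem.List.clampIdx, if_pos hk']
        split <;> omega
      rw [hcl, List.drop_zero]
  · simp [pvFA, pvFB, hsw]

-- injectivity of '\n'-join on newline-free lines (for the tightness theorem)
theorem append_newline_inj : ∀ (a b x y : List Char), '\n' ∉ a → '\n' ∉ b →
    a ++ '\n' :: x = b ++ '\n' :: y → a = b ∧ x = y := by
  intro a
  induction a with
  | nil =>
    intro b x y _ hb h
    cases b with
    | nil => simpa using h
    | cons c b' =>
      simp only [List.nil_append, List.cons_append, List.cons.injEq] at h
      exact absurd (h.1 ▸ List.mem_cons_self) hb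
  | cons c a' ih =>
    intro b x y ha hb h
    cases b with
    | nil =>
      simp only [List.cons_append, List.nil_append, List.cons.injEq] at h
      exact absurd (h.1 ▸ List.mem_cons_self) ha
    | cons d b' =>
      simp only [List.cons_append, List.cons.injEq] at h
      have hrec := ih b' x y (fun hm => ha (List.mem_cons_of_mem _ hm))
        (fun hm => hb (List.mem_cons_of_mem _ hm)) h.2
      exact ⟨by rw [h.1, hrec.1], hrec.2⟩

theorem join_inj : ∀ (l1 l2 : List (List Char)), l1.length = l2.length →
    (∀ l ∈ l1, '\n' ∉ l) → (∀ l ∈ l2, '\n' ∉ l) →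
    PySem.Chars.join ['\n'] l1 = PySem.Chars.join ['\n'] l2 → l1 = l2 := by
  intro l1
  induction l1 with
  | nil =>
    intro l2 hlen _ _ _
    cases l2 with
    | nil => rfl
    | cons b t' => simp at hlen
  | cons a t ih =>
    intro l2 hlen h1 h2 hj
    cases l2 with
    | nil => simp at hlen
    | cons b t' =>
      cases t with
      | nil =>
        cases t' with
        | nil =>
          rw [PySem.Chars.join_singleton, PySem.Chars.join_singleton] at hj
          rw [hj]
        | cons u v => simp at hlen
      | cons p q =>
        cases t' with
        | nil => simp at hlen
        | cons u v =>
          rw [PySem.Chars.join_cons_cons, PySem.Chars.join_cons_cons] at hj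
          simp only [List.append_assoc, List.singleton_append] at hj
          obtain ⟨hab, hrest⟩ := append_newline_inj a b _ _
            (h1 a List.mem_cons_self) (h2 b List.mem_cons_self) hj
          have := ih (u :: v) (by simpa using hlen)
            (fun l hm => h1 l (List.mem_cons_of_mem _ hm))
            (fun l hm => h2 l (List.mem_cons_of_mem _ hm)) hrest
          rw [hab, this]

-- every line produced by pvLines is newline-free
theorem pvLines_noNL_mem : ∀ (cs : List Char), ∀ l ∈ pvLines cs, '\n' ∉ l := by
  intro cs
  induction cs with
  | nil => intro l hl; simp [pvLines] at hl; simp [hl]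
  | cons c r ih =>
    intro l hl
    by_cases hc : c = '\n'
    · subst hc
      rw [show pvLines ('\n' :: r) = [] :: pvLines r from by simp [pvLines]] at hl
      rcases List.mem_cons.mp hl with h | h
      · simp [h]
      · exact ih l h
    · simp only [pvLines, if_neg hc] at hl
      cases hh : pvLines r with
      | nil => exact absurd hh (pvLines_ne_nil r)
      | cons h0 t0 =>
        rw [hh] at hl
        rcases List.mem_cons.mp hl with h | h
        · subst h
          intro hm
          rcases List.mem_cons.mp hm with h | h
          · exact hc h.symm
          · exact ih h0 (hh ▸ List.mem_cons_self) h
        · exact ih l (hh ▸ List.mem_cons_of_mem _ h)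

theorem pvFA_noNL (k : Int) (ll : List (List Char)) (h : ∀ l ∈ ll, '\n' ∉ l) :
    ∀ l ∈ ll.map (pvFA k), '\n' ∉ l := by
  intro l hl
  obtain ⟨l0, hl0, rfl⟩ := List.mem_map.mp hl
  unfold pvFA
  split
  · simp only [PySem.Chars.slice_eq_listSlice, PySem.List.slice_some_none]
    exact fun hm => h l0 hl0 (List.mem_of_mem_drop hm)
  · exact h l0 hl0

theorem pvFB_noNL (k : Int) (hk : k < 0) (ll : List (List Char)) (h : ∀ l ∈ ll, '\n' ∉ l) :
    ∀ l ∈ ll.map (pvFB k), '\n' ∉ l := by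
  intro l hl
  obtain ⟨l0, hl0, rfl⟩ := List.mem_map.mp hl
  unfold pvFB
  split
  · rw [pvEat_nonpos (by omega)]
    exact h l0 hl0
  · exact h l0 hl0

-- ===== VERDICT (by name: the statement is the Claim_ definition above) =====
theorem convertExpected_spec : Claim_unchanged_convertExpected := by
  intro data k _hDom
  unfold Spec_convertExpected
  intro hD
  unfold D_convertExpected at hD
  simp only [convertExpected, convertExpected_alt]
  rw [splitOn_eq_pvLines, foldl_push, List.nil_append,
      run_all k data.toList.length data.toList le_rfl [], List.nil_append]
  congr 1
  apply congrArg
  apply List.map_congr_left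
  intro l hl
  apply line_agree
  intro ⟨hk, hsw, hlen⟩
  exact hD ⟨hk, l, hl, hsw, hlen⟩

theorem convertExpected_changed : Claim_changed_convertExpected := by
  unfold Claim_changed_convertExpected; decide

theorem convertExpected_tight : Claim_exact_convertExpected := by
  intro data k _hDom hD heq
  obtain ⟨hk, l, hl, hsw, hlen⟩ := hD
  have heq' : (pvLines data.toList).map (pvFA k) = (pvLines data.toList).map (pvFB k) := by
    have h1 := congrArg String.toList heq
    simp only [convertExpected, convertExpected_alt, String.toList_ofList] at h1
    rw [splitOn_eq_pvLines, foldl_push, List.nil_append,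
        run_all k data.toList.length data.toList le_rfl [], List.nil_append] at h1
    exact join_inj _ _ (by simp) (pvFA_noNL k (pvLines data.toList) (pvLines_noNL_mem data.toList))
      (pvFB_noNL k hk (pvLines data.toList) (pvLines_noNL_mem data.toList)) h1
  have hline : pvFA k l = pvFB k l := (List.map_eq_map_iff.mp heq') l hl
  have hB : pvFB k l = l := by
    simp only [pvFB, if_pos hsw]
    exact pvEat_nonpos (by omega) l
  have hm : PySem.List.clampIdx l.length k = ((l.length : Int) + k).toNat := by
    simp only [PySem.List.clampIdx, if_pos hk]
    rw [if_neg (by omega)]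
  have hA : pvFA k l = l.drop ((l.length : Int) + k).toNat := by
    simp only [pvFA, if_pos hsw, PySem.Chars.slice_eq_listSlice, PySem.List.slice_some_none, hm]
  rw [hA, hB] at hline
  have hlength := congrArg List.length hline
  rw [List.length_drop] at hlength
  omega
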